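-- pv_equiv track=rewrite | github.com/commons-research/ontology-weaver | scripts/sync_alignment_sqlite.py | build_group_rows
-- ===== SOURCE A (Python) =====
-- def clean(value: str) -> str:
--     """Return stripped text with None-safe fallback."""
--     return (value or "").strip()
--
-- def build_group_rows(mapping_rows: list[dict[str, str]]) -> list[dict[str, str]]:
--     """Group source mappings by canonical term."""
--     groups: dict[tuple[str, str, str], list[dict[str, str]]] = {}
--     for row in mapping_rows:
--         key = (
--             clean(row.get("canonical_term_iri", "")),
--             clean(row.get("canonical_term_label", "")),
--             clean(row.get("canonical_term_source", "")),
--         )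
--         groups.setdefault(key, []).append(row)
--
--     out: list[dict[str, str]] = []
--     for key in sorted(groups.keys()):
--         canonical_iri, canonical_label, canonical_source = key
--         group_items = groups[key]
--         source_entries = sorted(
--             {
--                 (
--                     clean(item.get("source_term_source", "")),
--                     clean(item.get("source_term_iri", "")),
--                     clean(item.get("source_term_label", "")),
--                 )
--                 for item in group_items
--             }
--         )
--         out.append(
--             {
--                 "canonical_term_iri": canonical_iri,
--                 "canonical_term_label": canonical_label,
--                 "canonical_term_source": canonical_source,
--                 "mapped_term_count": str(len(source_entries)),
--                 "mapped_terms": " | ".join(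
--                     f"{src}:{iri}:{label}" for src, iri, label in source_entries
--                 ),
--                 "alignment_ids": " | ".join(
--                     sorted({clean(item.get("alignment_id", "")) for item in group_items})
--                 ),
--             }
--         )
--     return out
-- ===== SOURCE B (Python) =====
-- def clean(value: str) -> str:
--     """Return stripped text with None-safe fallback."""
--     return (value or "").strip()
--
--
-- def _canon_key(row):
--     return (
--         clean(row.get("canonical_term_iri", "")),
--         clean(row.get("canonical_term_label", "")),
--         clean(row.get("canonical_term_source", "")),
--     )
--
--
-- def build_group_rows(mapping_rows: list[dict[str, str]]) -> list[dict[str, str]]: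
--     """Group source mappings by canonical term: one ordered sweep over the rows
--     sorted by their cleaned canonical key, emitting a summary per consecutive run."""
--     ordered = sorted(mapping_rows, key=_canon_key)
--     out: list[dict[str, str]] = []
--     i, n = 0, len(ordered)
--     while i < n:
--         key = _canon_key(ordered[i])
--         j = i + 1
--         while j < n and _canon_key(ordered[j]) == key:
--             j += 1
--         items = ordered[i:j]
--         entries = list(dict.fromkeys(sorted(
--             (
--                 clean(it.get("source_term_source", "")),
--                 clean(it.get("source_term_iri", "")),
--                 clean(it.get("source_term_label", "")),
--             )
--             for it in items
--         )))
--         ids = list(dict.fromkeys(sorted(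
--             clean(it.get("alignment_id", "")) for it in items
--         )))
--         out.append({
--             "canonical_term_iri": key[0],
--             "canonical_term_label": key[1],
--             "canonical_term_source": key[2],
--             "mapped_term_count": str(len(entries)),
--             "mapped_terms": " | ".join(f"{src}:{iri}:{label}" for src, iri, label in entries),
--             "alignment_ids": " | ".join(ids),
--         })
--         i = j
--     return out
-- ===== Notes on version B (the rewrite author's own statement) =====
-- stated objective: idiomatic
-- what changed: Replaces the setdefault-dict grouping plus per-key set comprehensions with a sort-then-sweep: rows are sorted once by their cleaned canonical key, consecutive runs are grouped in a single ordered pass, and the per-group entry/id lists are obtained by sorting with duplicates and deduplicating via dict.fromkeys instead of building a set then sorting it.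
import Mathlib
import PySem

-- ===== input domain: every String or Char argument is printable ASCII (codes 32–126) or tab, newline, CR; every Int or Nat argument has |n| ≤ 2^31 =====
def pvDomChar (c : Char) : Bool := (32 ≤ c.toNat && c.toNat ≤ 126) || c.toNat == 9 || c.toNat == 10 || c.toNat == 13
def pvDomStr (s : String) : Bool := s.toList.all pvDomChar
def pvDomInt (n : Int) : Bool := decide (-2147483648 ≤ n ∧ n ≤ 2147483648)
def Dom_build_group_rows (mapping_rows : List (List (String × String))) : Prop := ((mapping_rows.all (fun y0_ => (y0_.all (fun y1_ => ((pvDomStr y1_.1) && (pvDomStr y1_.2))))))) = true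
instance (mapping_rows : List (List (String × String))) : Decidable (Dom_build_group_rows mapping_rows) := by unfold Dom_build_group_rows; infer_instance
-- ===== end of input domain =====

-- B replaces A's setdefault-dict grouping with a sort-then-sweep over consecutive runs of
-- equal cleaned canonical key; per-group lists come from sort-with-duplicates + ordered
-- dedup (dict.fromkeys) instead of set-then-sort (objective: idiomatic single ordered pass).

-- ===== PORT A =====
-- clean(value) = (value or "").strip(); on strings "" or s both yield the strip, so clean = strip
def pvClean (s : String) : String := PySem.Str.strip s

-- Python compares the string triples lexicographically: the sort key is the lexicographic
-- order on the triple (Mathlib's Lex product), exact for tuple comparison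
def pvLexKey (k : String × String × String) : Lex (String × Lex (String × String)) :=
  toLex (k.1, toLex (k.2.1, k.2.2))

def pvKeyOf (row : List (String × String)) : String × String × String :=
  (pvClean ((PySem.Dict.mk row).getD "canonical_term_iri" ""),
   pvClean ((PySem.Dict.mk row).getD "canonical_term_label" ""),
   pvClean ((PySem.Dict.mk row).getD "canonical_term_source" ""))

def pvSrcOf (row : List (String × String)) : String × String × String :=
  (pvClean ((PySem.Dict.mk row).getD "source_term_source" ""),
   pvClean ((PySem.Dict.mk row).getD "source_term_iri" ""),
   pvClean ((PySem.Dict.mk row).getD "source_term_label" ""))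

-- the summary dict A builds for one group
def pvSummary (key : String × String × String) (items : List (List (String × String))) :
    List (String × String) :=
  let source_entries :=
    PySem.List.sorted (PySem.Set.ofList (items.map pvSrcOf)) pvLexKey false
  [("canonical_term_iri", key.1),
   ("canonical_term_label", key.2.1),
   ("canonical_term_source", key.2.2),
   ("mapped_term_count", PySem.Int.toStr (source_entries.length : Int)),
   ("mapped_terms", PySem.Str.join " | "
      (source_entries.map (fun e => e.1 ++ ":" ++ e.2.1 ++ ":" ++ e.2.2))),
   ("alignment_ids", PySem.Str.join " | "
      (PySem.List.sorted
        (PySem.Set.ofList (items.map (fun it => pvClean ((PySem.Dict.mk it).getD "alignment_id" ""))))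
        (fun s => s) false))]

def build_group_rows (mapping_rows : List (List (String × String))) : List (List (String × String)) :=
  let groups := mapping_rows.foldl
    (fun g row => g.modify (pvKeyOf row) [] (fun l => l ++ [row]))
    (PySem.Dict.empty : PySem.Dict (String × String × String) (List (List (String × String))))
  (PySem.List.sorted groups.keys pvLexKey false).foldl
    (fun out key => out ++ [pvSummary key (groups.getD key [])]) []

-- ===== PORT B =====
def bClean (s : String) : String := PySem.Str.strip s

def bKey (row : List (String × String)) : String × String × String :=
  (bClean ((PySem.Dict.mk row).getD "canonical_term_iri" ""),
   bClean ((PySem.Dict.mk row).getD "canonical_term_label" ""),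
   bClean ((PySem.Dict.mk row).getD "canonical_term_source" ""))

def bLex (k : String × String × String) : Lex (String × Lex (String × String)) :=
  toLex (k.1, toLex (k.2.1, k.2.2))

-- the inner while loop: the run of leading rows sharing the first row's key, and the rest
-- (the outer while loop over the index i becomes this recursion over the ordered suffix)
def bRuns (l : List (List (String × String))) :
    List ((List (String × String)) × List (List (String × String))) :=
  match l with
  | [] => []
  | r :: rest =>
    (r, r :: rest.takeWhile (fun x => bKey x == bKey r)) ::
      bRuns (rest.dropWhile (fun x => bKey x == bKey r))
termination_by l.length
decreasing_by
  simpa using Nat.lt_succ_of_le (List.length_dropWhile_le _ rest)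

-- one group's output dict: sorted-with-duplicates, then ordered dedup (dict.fromkeys)
def bSummary (key : String × String × String) (items : List (List (String × String))) :
    List (String × String) :=
  let entries := PySem.List.dedup
    (PySem.List.sorted (items.map (fun it =>
      (bClean ((PySem.Dict.mk it).getD "source_term_source" ""),
       bClean ((PySem.Dict.mk it).getD "source_term_iri" ""),
       bClean ((PySem.Dict.mk it).getD "source_term_label" "")))) bLex false)
  let ids := PySem.List.dedup
    (PySem.List.sorted (items.map (fun it => bClean ((PySem.Dict.mk it).getD "alignment_id" "")))
      (fun s => s) false)
  [("canonical_term_iri", key.1),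
   ("canonical_term_label", key.2.1),
   ("canonical_term_source", key.2.2),
   ("mapped_term_count", PySem.Int.toStr (entries.length : Int)),
   ("mapped_terms", PySem.Str.join " | "
      (entries.map (fun e => e.1 ++ ":" ++ e.2.1 ++ ":" ++ e.2.2))),
   ("alignment_ids", PySem.Str.join " | " ids)]

def build_group_rows_alt (mapping_rows : List (List (String × String))) : List (List (String × String)) :=
  (bRuns (PySem.List.sorted mapping_rows (fun r => bLex (bKey r)) false)).map
    (fun p => bSummary (bKey p.1) p.2)

-- ===== PRECONDITION & SPEC =====
def Spec_build_group_rows (mapping_rows : List (List (String × String))) (out : List (List (String × String))) : Prop := out = build_group_rows_alt mapping_rows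
instance (mapping_rows : List (List (String × String))) (out : List (List (String × String))) : Decidable (Spec_build_group_rows mapping_rows out) := by unfold Spec_build_group_rows; infer_instance

-- ===== CLAIM (what is proved, stated in full; the proofs are below) =====
def Claim_equal_build_group_rows : Prop := ∀ (mapping_rows : List (List (String × String))), Dom_build_group_rows mapping_rows → Spec_build_group_rows mapping_rows (build_group_rows mapping_rows)

-- ===== LEMMAS AND PROOFS =====

theorem bLex_injective : Function.Injective bLex := by
  rintro ⟨a1, a2, a3⟩ ⟨b1, b2, b3⟩ h
  simp only [bLex, toLex_inj, Prod.mk.injEq] at h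
  simp [h.1, h.2.1, h.2.2]

-- the grouping dict's keys are the distinct canonical keys in first-occurrence order
theorem pv_keys_groups (rows : List (List (String × String))) :
    (rows.foldl
      (fun g row => g.modify (pvKeyOf row) [] (fun l => l ++ [row]))
      (PySem.Dict.empty : PySem.Dict (String × String × String) (List (List (String × String))))).keys
    = PySem.Set.ofList (rows.map pvKeyOf) := by
  rw [PySem.Dict.keys_foldl_modify_key]
  simp [PySem.Dict.keys_empty, PySem.Set.update_nil_left]

-- the grouping dict's entry at k is the filter of the input at k
theorem pv_getD_groups (rows : List (List (String × String)))
    (d : PySem.Dict (String × String × String) (List (List (String × String))))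
    (k : String × String × String) :
    (rows.foldl (fun g row => g.modify (pvKeyOf row) [] (fun l => l ++ [row])) d).getD k []
    = d.getD k [] ++ rows.filter (fun r => pvKeyOf r == k) := by
  induction rows generalizing d with
  | nil => simp
  | cons r rs ih =>
    rw [List.foldl_cons, ih, List.filter_cons, PySem.Dict.getD_modify]
    by_cases h : pvKeyOf r = k
    · simp [h]
    · simp [h, Ne.symm h]

-- set(xs) keeps a subsequence of xs (first occurrences in order)
theorem ofList_sublist {α : Type} [BEq α] (xs : List α) :
    (PySem.Set.ofList xs).Sublist xs := by
  induction xs using List.reverseRecOn with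
  | nil => simp [PySem.Set.ofList]
  | append_singleton ys y ih =>
    rw [PySem.Set.ofList_append_singleton, PySem.Set.add]
    split
    · exact ih.trans (List.sublist_append_left ys [y])
    · exact List.Sublist.append ih (List.Sublist.refl [y])

-- sorted(set(xs)) = dedup(sorted(ys)) whenever ys is a rearrangement of xs and the key is injective
theorem sorted_ofList_eq {α κ : Type} [BEq α] [LawfulBEq α] [LinearOrder κ]
    (key : α → κ) (hinj : Function.Injective key)
    (xs ys : List α) (h : ys.Perm xs) :
    PySem.List.sorted (PySem.Set.ofList xs) key false
      = PySem.Set.ofList (PySem.List.sorted ys key false) := by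
  apply PySem.List.sorted_eq_of_perm_of_pairwise_lt
  · rw [List.perm_ext_iff_of_nodup (PySem.Set.nodup_ofList _) (PySem.Set.nodup_ofList _)]
    intro a
    rw [PySem.Set.mem_ofList, PySem.Set.mem_ofList, PySem.List.mem_sorted, h.mem_iff]
  · have hle : List.Pairwise (fun a b => key a ≤ key b)
        (PySem.Set.ofList (PySem.List.sorted ys key false)) :=
      (PySem.List.sorted_pairwise ys key).sublist (ofList_sublist _)
    have hnd : List.Pairwise (fun a b : α => a ≠ b)
        (PySem.Set.ofList (PySem.List.sorted ys key false)) :=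
      PySem.Set.nodup_ofList _
    refine (hle.and hnd).imp ?_
    rintro a b ⟨hab, hne⟩
    exact lt_of_le_of_ne hab (fun hk => hne (hinj hk))

-- B's per-group dict equals A's, for any rearrangement of the group's items
theorem summary_eq (k : String × String × String)
    (items items' : List (List (String × String))) (h : items.Perm items') :
    bSummary k items = pvSummary k items' := by
  have hsrc : (fun it : List (String × String) =>
      (bClean ((PySem.Dict.mk it).getD "source_term_source" ""),
       bClean ((PySem.Dict.mk it).getD "source_term_iri" ""),
       bClean ((PySem.Dict.mk it).getD "source_term_label" ""))) = pvSrcOf := rfl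
  have he : PySem.List.dedup
      (PySem.List.sorted (items.map pvSrcOf) bLex false)
      = PySem.List.sorted (PySem.Set.ofList (items'.map pvSrcOf)) pvLexKey false := by
    rw [PySem.List.dedup_eq_ofList]
    exact (sorted_ofList_eq pvLexKey bLex_injective _ _ (h.map pvSrcOf)).symm
  have hid : PySem.List.dedup
      (PySem.List.sorted (items.map (fun it => bClean ((PySem.Dict.mk it).getD "alignment_id" "")))
        (fun s => s) false)
      = PySem.List.sorted
          (PySem.Set.ofList (items'.map (fun it => pvClean ((PySem.Dict.mk it).getD "alignment_id" ""))))
          (fun s => s) false := by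
    rw [PySem.List.dedup_eq_ofList]
    exact (sorted_ofList_eq (fun s : String => s) (fun _ _ hs => hs) _ _
      (h.map _)).symm
  simp only [bSummary, pvSummary, hsrc, he, hid]

-- sortedness of a list of rows: keys nondecreasing along the list
def BSorted (l : List (List (String × String))) : Prop :=
  l.Pairwise (fun a b => bLex (bKey a) ≤ bLex (bKey b))

-- in a key-sorted list bounded below by k0, everything after the leading k0-run has key ≠ k0
theorem not_mem_drop_key (k0 : String × String × String) :
    ∀ (rest : List (List (String × String))), BSorted rest →
    (∀ y ∈ rest, bLex k0 ≤ bLex (bKey y)) →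
    ∀ x ∈ rest.dropWhile (fun y => bKey y == k0), bKey x ≠ k0 := by
  intro rest
  induction rest with
  | nil => intro _ _ x hx; simp at hx
  | cons a t ih =>
    intro hp hlb x hx
    rw [List.dropWhile_cons] at hx
    by_cases ha : bKey a = k0
    · rw [if_pos (by simp [ha])] at hx
      exact ih (List.pairwise_cons.mp (by exact hp)).2
        (fun y hy => hlb y (List.mem_cons_of_mem a hy)) x hx
    · rw [if_neg (by simp [ha])] at hx
      have hlt : bLex k0 < bLex (bKey a) :=
        lt_of_le_of_ne (hlb a (List.mem_cons_self))
          (fun he => ha (bLex_injective he.symm))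
      rcases List.mem_cons.mp hx with rfl | hx'
      · exact ha
      · have hle : bLex (bKey a) ≤ bLex (bKey x) :=
          (List.pairwise_cons.mp (by exact hp)).1 x hx'
        intro hk
        rw [hk] at hle
        exact absurd (lt_of_lt_of_le hlt hle) (lt_irrefl _)

-- in a key-sorted list bounded below by k0, the k0-filter is the leading run
theorem filter_eq_takeWhile_key (k0 : String × String × String) :
    ∀ (rest : List (List (String × String))), BSorted rest →
    (∀ y ∈ rest, bLex k0 ≤ bLex (bKey y)) →
    rest.filter (fun y => bKey y == k0) = rest.takeWhile (fun y => bKey y == k0) := by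
  intro rest
  induction rest with
  | nil => intro _ _; rfl
  | cons a t ih =>
    intro hp hlb
    rw [List.filter_cons, List.takeWhile_cons]
    by_cases ha : bKey a = k0
    · rw [if_pos (by simp [ha]), if_pos (by simp [ha])]
      rw [ih (List.pairwise_cons.mp (by exact hp)).2
        (fun y hy => hlb y (List.mem_cons_of_mem a hy))]
    · rw [if_neg (by simp [ha]), if_neg (by simp [ha])]
      apply List.filter_eq_nil_iff.mpr
      intro x hx
      have hlt : bLex k0 < bLex (bKey a) :=
        lt_of_le_of_ne (hlb a (List.mem_cons_self))
          (fun he => ha (bLex_injective he.symm))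
      have hle : bLex (bKey a) ≤ bLex (bKey x) :=
        (List.pairwise_cons.mp (by exact hp)).1 x hx
      simp only [beq_iff_eq]
      intro hk
      rw [hk] at hle
      exact absurd (lt_of_lt_of_le hlt hle) (lt_irrefl _)

-- folding Set.add over elements already present changes nothing
theorem foldl_add_of_all_mem {α : Type} [BEq α] [LawfulBEq α] :
    ∀ (xs : List α) (s : PySem.Set α), (∀ x ∈ xs, x ∈ s) → xs.foldl PySem.Set.add s = s := by
  intro xs
  induction xs with
  | nil => intro s _; rfl
  | cons x t ih =>
    intro s h
    rw [List.foldl_cons, PySem.Set.add_of_mem (h x List.mem_cons_self)]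
    exact ih s (fun y hy => h y (List.mem_cons_of_mem x hy))

-- folding Set.add of elements disjoint from a prefix acts on the suffix only
theorem foldl_add_append_disjoint {α : Type} [BEq α] [LawfulBEq α] :
    ∀ (post : List α) (s₀ s₁ : List α), (∀ x ∈ post, x ∉ s₀) →
    post.foldl PySem.Set.add (s₀ ++ s₁) = s₀ ++ post.foldl PySem.Set.add s₁ := by
  intro post
  induction post with
  | nil => intro s₀ s₁ _; rfl
  | cons x t ih =>
    intro s₀ s₁ h
    rw [List.foldl_cons, List.foldl_cons]
    have hx : x ∉ s₀ := h x List.mem_cons_self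
    by_cases hm : x ∈ s₁
    · rw [PySem.Set.add_of_mem (by simp [hm]), PySem.Set.add_of_mem hm]
      exact ih s₀ s₁ (fun y hy => h y (List.mem_cons_of_mem x hy))
    · rw [PySem.Set.add_of_not_mem (by simp [hx, hm]), PySem.Set.add_of_not_mem hm,
        List.append_assoc]
      exact ih s₀ (s₁ ++ [x]) (fun y hy => h y (List.mem_cons_of_mem x hy))

-- distinct keys of (k0-run ++ rest') = k0 :: distinct keys of rest'
theorem ofList_run (k0 : String × String × String) (pre post : List (String × String × String))
    (hpre : ∀ x ∈ pre, x = k0) (hpost : k0 ∉ post) :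
    PySem.Set.ofList (k0 :: (pre ++ post)) = k0 :: PySem.Set.ofList post := by
  rw [PySem.Set.ofList_eq_foldl, List.foldl_cons, List.foldl_append]
  have h1 : PySem.Set.add ([] : PySem.Set _) k0 = [k0] := rfl
  rw [h1, foldl_add_of_all_mem pre [k0] (by intro x hx; simp [hpre x hx])]
  have h2 : ([k0] : List _) = [k0] ++ [] := rfl
  rw [h2, foldl_add_append_disjoint post [k0] [] (by intro x hx; simp; rintro rfl; exact hpost hx)]
  rw [PySem.Set.ofList_eq_foldl]
  rfl

-- the sweep over a key-sorted list, mapped through any per-group function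
theorem bRuns_map {β : Type} (F : (String × String × String) → List (List (String × String)) → β) :
    ∀ (l : List (List (String × String))), BSorted l →
    (bRuns l).map (fun p => F (bKey p.1) p.2)
      = (PySem.Set.ofList (l.map bKey)).map (fun k => F k (l.filter (fun r => bKey r == k))) := by
  intro l
  induction l using bRuns.induct with
  | case1 => intro _; simp [bRuns]
  | case2 r rest ih =>
    intro hp
    have hpr : BSorted rest := (List.pairwise_cons.mp hp).2
    have hlb : ∀ y ∈ rest, bLex (bKey r) ≤ bLex (bKey y) := (List.pairwise_cons.mp hp).1
    have hpd : BSorted (rest.dropWhile (fun x => bKey x == bKey r)) :=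
      hpr.sublist (List.dropWhile_sublist _)
    have hdk : ∀ x ∈ rest.dropWhile (fun x => bKey x == bKey r), bKey x ≠ bKey r :=
      not_mem_drop_key (bKey r) rest hpr hlb
    have htk : ∀ x ∈ rest.takeWhile (fun x => bKey x == bKey r), bKey x = bKey r :=
      fun x hx => by simpa using List.mem_takeWhile_imp hx
    have htd : rest.takeWhile (fun x => bKey x == bKey r)
        ++ rest.dropWhile (fun x => bKey x == bKey r) = rest :=
      List.takeWhile_append_dropWhile
    have hkeys : PySem.Set.ofList (bKey r :: rest.map bKey)
        = bKey r :: PySem.Set.ofList ((rest.dropWhile (fun x => bKey x == bKey r)).map bKey) := by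
      conv_lhs => rw [← htd, List.map_append]
      exact ofList_run (bKey r) _ _
        (by intro x hx; rcases List.mem_map.mp hx with ⟨y, hy, rfl⟩; exact htk y hy)
        (by intro hx; rcases List.mem_map.mp hx with ⟨y, hy, he⟩; exact hdk y hy he)
    have hg0 : (r :: rest).filter (fun x => bKey x == bKey r)
        = r :: rest.takeWhile (fun x => bKey x == bKey r) := by
      rw [List.filter_cons, if_pos (by simp), filter_eq_takeWhile_key (bKey r) rest hpr hlb]
    have hgk : ∀ k ∈ PySem.Set.ofList ((rest.dropWhile (fun x => bKey x == bKey r)).map bKey),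
        (r :: rest).filter (fun x => bKey x == k)
          = (rest.dropWhile (fun x => bKey x == bKey r)).filter (fun x => bKey x == k) := by
      intro k hk
      have hkne : k ≠ bKey r := by
        rcases List.mem_map.mp ((PySem.Set.mem_ofList _ _).mp hk) with ⟨y, hy, rfl⟩
        exact hdk y hy
      rw [List.filter_cons, if_neg (by simp; exact fun he => hkne he.symm)]
      conv_lhs => rw [← htd]
      rw [List.filter_append]
      have hft : (rest.takeWhile (fun x => bKey x == bKey r)).filter (fun x => bKey x == k) = [] := by
        apply List.filter_eq_nil_iff.mpr
        intro x hx
        simp only [beq_iff_eq]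
        intro he
        exact hkne (he ▸ (htk x hx) ▸ rfl)
      rw [hft, List.nil_append]
    rw [bRuns]
    simp only [List.map_cons, hkeys, ih hpd, hg0]
    congr 1
    exact (List.map_congr_left (fun k hk => congrArg (F k) (hgk k hk))).symm

-- sorted distinct keys of the input = distinct keys of the sorted input, in order
theorem keyset_eq (rows : List (List (String × String))) :
    PySem.List.sorted (PySem.Set.ofList (rows.map bKey)) bLex false
      = PySem.Set.ofList ((PySem.List.sorted rows (fun r => bLex (bKey r)) false).map bKey) := by
  have h := sorted_ofList_eq bLex bLex_injective (rows.map bKey)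
    ((PySem.List.sorted rows (fun r => bLex (bKey r)) false).map bKey)
    ((PySem.List.sorted_perm rows _ false).map bKey)
  rw [h, PySem.List.sorted_eq_self_of_pairwise]
  exact List.pairwise_map.mpr (PySem.List.sorted_pairwise rows _)

-- ===== VERDICT (by name: the statement is the Claim_ definition above) =====
theorem build_group_rows_spec : Claim_equal_build_group_rows := by
  intro rows _
  unfold Spec_build_group_rows build_group_rows build_group_rows_alt
  simp only [pv_keys_groups, PySem.List.foldl_append_singleton_eq_map, List.nil_append]
  rw [bRuns_map (fun k run => bSummary k run) _ (PySem.List.sorted_pairwise rows _),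
    ← keyset_eq rows]
  apply List.map_congr_left
  intro k _
  rw [pv_getD_groups, PySem.Dict.getD_empty, List.nil_append]
  exact (summary_eq k _ _ ((PySem.List.sorted_perm rows _ false).filter _)).symm
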